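-- pv_equiv track=rewrite | github.com/rmkhan1999/Neural-Network-to-Describe-Simple-Pictures-Group-40 | src/data/validate_tictactoe_dataset.py | expected_label
-- ===== SOURCE A (Python) =====
-- from typing import Dict, List, Set
--
-- POSITION_ORDER = [
--     "top left",
--     "top middle",
--     "top right",
--     "middle left",
--     "center",
--     "middle right",
--     "bottom left",
--     "bottom middle",
--     "bottom right",
-- ]
--
-- def expected_label(x_positions: Set[str], o_positions: Set[str]) -> Dict[str, str]:
--     label: Dict[str, str] = {}
--     for p in POSITION_ORDER:
--         if p in x_positions:
--             label[p] = "X"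
--         elif p in o_positions:
--             label[p] = "O"
--         else:
--             label[p] = "empty"
--     return label
-- ===== SOURCE B (Python) =====
-- POSITION_ORDER = [
--     "top left",
--     "top middle",
--     "top right",
--     "middle left",
--     "center",
--     "middle right",
--     "bottom left",
--     "bottom middle",
--     "bottom right",
-- ]
--
-- def expected_label(x_positions, o_positions):
--     label = {p: "empty" for p in POSITION_ORDER}
--     for p in o_positions:
--         if p in label:
--             label[p] = "O"
--     for p in x_positions:
--         if p in label:
--             label[p] = "X"
--     return label
-- ===== Notes on version B (the rewrite author's own statement) =====
-- stated objective: alternative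
-- what changed: A decides each cell's label with one priority if/elif/else branch inside a single loop over POSITION_ORDER; B instead initializes every position to "empty" and then overwrites with two population passes over o_positions and x_positions (X last, so X wins), ignoring keys outside the board.
import Mathlib
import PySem

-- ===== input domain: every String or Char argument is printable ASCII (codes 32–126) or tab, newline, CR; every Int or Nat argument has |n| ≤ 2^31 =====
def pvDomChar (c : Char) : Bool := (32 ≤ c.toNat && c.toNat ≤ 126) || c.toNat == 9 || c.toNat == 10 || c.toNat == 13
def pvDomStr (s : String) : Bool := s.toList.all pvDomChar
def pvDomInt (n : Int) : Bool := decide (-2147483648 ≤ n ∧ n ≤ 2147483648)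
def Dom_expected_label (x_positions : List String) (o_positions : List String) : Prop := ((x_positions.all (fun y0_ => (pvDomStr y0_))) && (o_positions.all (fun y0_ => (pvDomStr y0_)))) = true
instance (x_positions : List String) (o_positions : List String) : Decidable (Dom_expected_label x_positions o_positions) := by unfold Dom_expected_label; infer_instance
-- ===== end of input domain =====

-- B replaces A's single priority if/elif/else loop by an "empty" initialization followed by
-- two overwrite passes (O then X) over the argument lists; alternative decomposition, same cost.

def pvPositionOrder : List String :=
  ["top left", "top middle", "top right",
   "middle left", "center", "middle right",
   "bottom left", "bottom middle", "bottom right"]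

-- ===== PORT A =====
def expected_label (x_positions : List String) (o_positions : List String) : List (String × String) :=
  (pvPositionOrder.foldl
    (fun d p =>
      if x_positions.contains p then d.insert p "X"
      else if o_positions.contains p then d.insert p "O"
      else d.insert p "empty")
    PySem.Dict.empty).items

-- ===== PORT B =====
def expected_label_alt (x_positions : List String) (o_positions : List String) : List (String × String) :=
  let d0 := pvPositionOrder.foldl (fun d p => d.insert p "empty")
              (PySem.Dict.empty : PySem.Dict String String)
  let d1 := o_positions.foldl (fun d p => if d.contains p then d.insert p "O" else d) d0
  let d2 := x_positions.foldl (fun d p => if d.contains p then d.insert p "X" else d) d1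
  d2.items

-- ===== PRECONDITION & SPEC =====
def Spec_expected_label (x_positions : List String) (o_positions : List String) (out : List (String × String)) : Prop := out = expected_label_alt x_positions o_positions
instance (x_positions : List String) (o_positions : List String) (out : List (String × String)) : Decidable (Spec_expected_label x_positions o_positions out) := by unfold Spec_expected_label; infer_instance

-- ===== CLAIM (what is proved, stated in full; the proofs are below) =====
def Claim_equal_expected_label : Prop := ∀ (x_positions : List String) (o_positions : List String), Dom_expected_label x_positions o_positions → Spec_expected_label x_positions o_positions (expected_label x_positions o_positions)

-- ===== LEMMAS AND PROOFS =====

-- canonical form of the result: one pair per board position, X-priority label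
def pvLabelOf (x_positions : List String) (o_positions : List String) (q : String) : String :=
  if q ∈ x_positions then "X" else if q ∈ o_positions then "O" else "empty"

lemma fresh_fill (v : String → String) :
    (pvPositionOrder.foldl (fun d p => d.insert p (v p))
        (PySem.Dict.empty : PySem.Dict String String)).items
      = pvPositionOrder.map (fun q => (q, v q)) := by
  have h := PySem.Dict.items_foldl_insert_fresh pvPositionOrder id v
      (PySem.Dict.empty : PySem.Dict String String)
      (by intro a _; exact PySem.Dict.contains_empty a)
      (by simp only [List.map_id]; decide)
  simpa [PySem.Dict.items, id] using h

lemma expected_label_eq_map (x o : List String) :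
    expected_label x o = pvPositionOrder.map (fun q => (q, pvLabelOf x o q)) := by
  unfold expected_label
  have hbody : (fun (d : PySem.Dict String String) (p : String) =>
      if x.contains p then d.insert p "X"
      else if o.contains p then d.insert p "O"
      else d.insert p "empty")
      = fun d p => d.insert p (pvLabelOf x o p) := by
    funext d p
    simp only [pvLabelOf, List.contains_eq_mem]
    split_ifs with h1 h2 <;> simp_all
  rw [hbody, fresh_fill]

-- one overwrite pass: only keys of the board (which are exactly d's keys) get the value v
lemma pass_items (ps : List String) (v : String) (g : String → String)
    (d : PySem.Dict String String)
    (hd : d.items = pvPositionOrder.map (fun q => (q, g q))) :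
    (ps.foldl (fun d p => if d.contains p then d.insert p v else d) d).items
      = pvPositionOrder.map (fun q => (q, if q ∈ ps then v else g q)) := by
  induction ps generalizing g d with
  | nil => simpa using hd
  | cons p ps ih =>
    have hkeys : d.keys = pvPositionOrder := by
      simp [PySem.Dict.keys, hd, Function.comp_def]
    have hcont : d.contains p = decide (p ∈ pvPositionOrder) := by
      rw [PySem.Dict.contains_eq_decide_mem_keys, hkeys]
    simp only [List.foldl_cons]
    by_cases hp : p ∈ pvPositionOrder
    · rw [if_pos (by simp [hcont, hp])]
      have hins : (d.insert p v).items
          = pvPositionOrder.map (fun q => (q, if q = p then v else g q)) := by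
        rw [PySem.Dict.items_insert_of_contains d v (by simp [hcont, hp]), hd,
            List.map_map]
        refine List.map_congr_left (fun a _ => ?_)
        by_cases hap : a = p <;> simp [hap]
      rw [ih (fun q => if q = p then v else g q) _ hins]
      refine List.map_congr_left (fun a _ => ?_)
      by_cases hmem : a ∈ ps
      · simp [hmem]
      · by_cases hap : a = p <;> simp [hmem, hap]
    · rw [if_neg (by simp [hcont, hp])]
      rw [ih g d hd]
      refine List.map_congr_left (fun a ha => ?_)
      have hap : a ≠ p := fun h => hp (h ▸ ha)
      simp [hap]

lemma expected_label_alt_eq_map (x o : List String) :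
    expected_label_alt x o = pvPositionOrder.map (fun q => (q, pvLabelOf x o q)) := by
  unfold expected_label_alt
  have h0 : (pvPositionOrder.foldl (fun d p => d.insert p "empty")
      (PySem.Dict.empty : PySem.Dict String String)).items
      = pvPositionOrder.map (fun q => (q, (fun _ => "empty") q)) :=
    fresh_fill (fun _ => "empty")
  have h1 := pass_items o "O" (fun _ => "empty") _ h0
  have h2 := pass_items x "X" (fun q => if q ∈ o then "O" else "empty") _
      (by simpa using h1)
  simpa [pvLabelOf] using h2

-- ===== VERDICT (by name: the statement is the Claim_ definition above) =====
theorem expected_label_spec : Claim_equal_expected_label := by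
  intro x o _
  unfold Spec_expected_label
  rw [expected_label_eq_map, expected_label_alt_eq_map]
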